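-- pv_equiv track=rewrite | github.com/rtehok/perso-python | leetcode/2389_longest_subsequence_with_limited_sum.py | answerQueriesNaive
-- ===== SOURCE A (Python) =====
-- from typing import List
--
-- def answerQueriesNaive(nums: List[int], queries: List[int]) -> List[int]:
--     n = len(nums)
--     m = len(queries)
--     res = [0] * m
--
--     for i, q in enumerate(queries):
--         first = 0
--         while first < n and nums[first] > q:
--             first += 1
--
--         if first == n:
--             continue
--
--         tmp = 0
--         for num in sorted(nums[first:]):
--             tmp += num
--             if tmp <= q:
--                 res[i] += 1
--             else:
--                 continue
--
--     return res
-- ===== SOURCE B (Python) =====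
-- from typing import List
--
--
-- def _ordered_insert(s: List[int], x: int) -> List[int]:
--     # insert x into the sorted list s, keeping it sorted
--     pre = []
--     i = 0
--     while i < len(s) and s[i] <= x:
--         pre.append(s[i])
--         i += 1
--     return pre + [x] + s[i:]
--
--
-- def answerQueriesNaive(nums: List[int], queries: List[int]) -> List[int]:
--     n = len(nums)
--
--     # pm[i] = min(nums[0..i]) (non-increasing); the first index usable for a
--     # query q is the number of pm-entries that exceed q.
--     pm = []
--     for x in nums:
--         pm.append(pm[-1] if pm and pm[-1] < x else x)
--
--     # tables[i] = sorted list of the prefix sums of sorted(nums[i:]),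
--     # built once, right to left, keeping the sorted suffix incrementally.
--     tables = []
--     suffix = []
--     for i in range(n - 1, -1, -1):
--         suffix = _ordered_insert(suffix, nums[i])
--         acc = 0
--         t = []
--         for x in suffix:
--             acc += x
--             t.append(acc)
--         tables.append(sorted(t))
--     tables.reverse()
--
--     res = []
--     for q in queries:
--         first = 0
--         for v in pm:
--             if v > q:
--                 first += 1
--         if first == n:
--             res.append(0)
--         else:
--             c = 0
--             for s in tables[first]:
--                 if s <= q:
--                     c += 1
--             res.append(c)
--     return res
-- ===== Notes on version B (the rewrite author's own statement) =====
-- stated objective: alternative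
-- what changed: Instead of scanning for the start index and sorting the suffix again for every query, B precomputes once the prefix-minima array and, for every suffix start (built incrementally right-to-left with ordered inserts), the sorted prefix sums of the sorted suffix; each query then only counts prefix-minima entries above q and table entries at most q.
import Mathlib
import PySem

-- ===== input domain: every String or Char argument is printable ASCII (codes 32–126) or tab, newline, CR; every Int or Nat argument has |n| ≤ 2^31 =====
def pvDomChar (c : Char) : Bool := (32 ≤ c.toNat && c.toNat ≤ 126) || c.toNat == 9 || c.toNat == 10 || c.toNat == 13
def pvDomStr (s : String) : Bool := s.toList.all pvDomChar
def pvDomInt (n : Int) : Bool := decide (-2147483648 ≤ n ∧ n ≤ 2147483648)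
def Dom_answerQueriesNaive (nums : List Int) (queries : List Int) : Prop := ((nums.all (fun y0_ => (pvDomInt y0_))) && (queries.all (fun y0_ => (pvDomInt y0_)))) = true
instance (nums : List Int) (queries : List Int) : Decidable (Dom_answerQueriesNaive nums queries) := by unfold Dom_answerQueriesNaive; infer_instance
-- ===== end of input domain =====

-- B replaces A's per-query linear scan and per-query sort by a one-time precomputation
-- (prefix minima; per suffix start, the sorted prefix sums of the sorted suffix); objective: alternative.

-- ===== PORT A =====
-- while first < n and nums[first] > q: first += 1
def aWhile (nums : List Int) (q : Int) (first : Nat) : Nat :=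
  if h : first < nums.length ∧ q < PySem.List.pyGetD nums (first : Int) 0 then
    aWhile nums q (first + 1)
  else first
termination_by nums.length - first
decreasing_by omega

-- body of the inner 'for num in sorted(nums[first:])' loop (state: tmp, res)
def aStep (q : Int) (i : Int) (st : Int × List Int) (num : Int) : Int × List Int :=
  let tmp := st.1 + num
  if tmp ≤ q then (tmp, PySem.List.pySetD st.2 i (PySem.List.pyGetD st.2 i 0 + 1))
  else (tmp, st.2)

-- body of the 'for i, q in enumerate(queries)' loop
def aOuter (nums : List Int) (res : List Int) (iq : Int × Int) : List Int :=
  let i := iq.1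
  let q := iq.2
  let first := aWhile nums q 0
  if first = nums.length then res
  else
    ((PySem.List.sorted (PySem.List.slice nums (some (first : Int)) none) (fun x => x) false).foldl
      (aStep q i) ((0 : Int), res)).2

def answerQueriesNaive (nums : List Int) (queries : List Int) : List Int :=
  (PySem.List.enumerate queries).foldl (aOuter nums) (List.replicate queries.length 0)

-- ===== PORT B =====
-- _ordered_insert: while-loop prefix of elements ≤ x, then x, then the rest of s
def bInsOrd (s : List Int) (x : Int) : List Int :=
  let pre := s.takeWhile (fun y => decide (y ≤ x))
  pre ++ [x] ++ s.drop pre.length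

-- the acc/t loop building the prefix sums of a list
def bAccum (acc : Int) : List Int → List Int
  | [] => []
  | x :: xs => (acc + x) :: bAccum (acc + x) xs

-- the right-to-left table-building loop: returns (current sorted suffix, tables in index order)
def bTables : List Int → List Int × List (List Int)
  | [] => ([], [])
  | x :: rest =>
    let p := bTables rest
    let suffix := bInsOrd p.1 x
    (suffix, PySem.List.sorted (bAccum 0 suffix) (fun y => y) false :: p.2)

-- the pm loop: pm.append(pm[-1] if pm and pm[-1] < x else x)
def bPm (nums : List Int) : List Int :=
  nums.foldl (fun pm x =>
    pm ++ [match pm.getLast? with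
           | some l => if l < x then l else x
           | none => x]) []

def answerQueriesNaive_alt (nums : List Int) (queries : List Int) : List Int :=
  let n := nums.length
  let pm := bPm nums
  let tables := (bTables nums).2
  queries.map (fun q =>
    let first := pm.foldl (fun c v => if q < v then c + 1 else c) (0 : Int)
    if first = (n : Int) then 0
    else (PySem.List.pyGetD tables first []).foldl (fun c s => if s ≤ q then c + 1 else c) (0 : Int))

-- ===== PRECONDITION & SPEC =====
def Spec_answerQueriesNaive (nums : List Int) (queries : List Int) (out : List Int) : Prop := out = answerQueriesNaive_alt nums queries
instance (nums : List Int) (queries : List Int) (out : List Int) : Decidable (Spec_answerQueriesNaive nums queries out) := by unfold Spec_answerQueriesNaive; infer_instance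

-- ===== CLAIM (what is proved, stated in full; the proofs are below) =====
def Claim_equal_answerQueriesNaive : Prop := ∀ (nums : List Int) (queries : List Int), Dom_answerQueriesNaive nums queries → Spec_answerQueriesNaive nums queries (answerQueriesNaive nums queries)

-- ===== LEMMAS AND PROOFS =====

-- shorthand for sorted(xs)
def sortedL (xs : List Int) : List Int := PySem.List.sorted xs (fun y => y) false

-- the first index with nums[i] ≤ q
def fstIdx (nums : List Int) (q : Int) : Nat := (nums.takeWhile (fun x => decide (q < x))).length

-- A's inner counter as a pure function
def cntA (q t : Int) : List Int → Int
  | [] => 0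
  | x :: xs => (if t + x ≤ q then 1 else 0) + cntA q (t + x) xs

-- pure per-query value of A
def fA (nums : List Int) (q : Int) : Int :=
  if aWhile nums q 0 = nums.length then 0
  else cntA q 0 (sortedL (PySem.List.slice nums (some ((aWhile nums q 0 : Nat) : Int)) none))

-- running minimum sequence starting below c
def pmW (c : Int) : List Int → List Int
  | [] => []
  | x :: xs => (if c < x then c else x) :: pmW (if c < x then c else x) xs

-- table spec
def tSpec : List Int → List (List Int)
  | [] => []
  | x :: xs => sortedL (bAccum 0 (sortedL (x :: xs))) :: tSpec xs

lemma drop_len_takeWhile (p : Int → Bool) : ∀ l : List Int, l.drop (l.takeWhile p).length = l.dropWhile p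
  | [] => rfl
  | x :: xs => by
    by_cases h : p x
    · simp [List.takeWhile_cons, List.dropWhile_cons, h, drop_len_takeWhile p xs]
    · simp [List.takeWhile_cons, List.dropWhile_cons, h]

lemma aWhile_eq (nums : List Int) (q : Int) :
    ∀ f, f ≤ nums.length →
      aWhile nums q f = f + ((nums.drop f).takeWhile (fun x => decide (q < x))).length := by
  intro f hf
  induction hn : nums.length - f generalizing f with
  | zero =>
    have hf' : f = nums.length := by omega
    subst hf'
    rw [aWhile]
    simp
  | succ k ih =>
    have hlt : f < nums.length := by omega
    have hget : PySem.List.pyGetD nums (f : Int) 0 = nums[f] := by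
      rw [PySem.List.pyGetD_natCast, List.getD_eq_getElem _ _ hlt]
    rw [aWhile, List.drop_eq_getElem_cons hlt]
    by_cases hq : q < nums[f]
    · rw [dif_pos ⟨hlt, by rw [hget]; exact hq⟩, ih (f + 1) (by omega) (by omega),
        List.takeWhile_cons_of_pos (by simpa using hq), List.length_cons]
      omega
    · rw [dif_neg (by rw [hget]; tauto), List.takeWhile_cons_of_neg (by simpa using hq)]
      simp

lemma bPm_fold : ∀ (xs pre : List Int) (c : Int), pre.getLast? = some c →
    xs.foldl (fun pm x =>
      pm ++ [match pm.getLast? with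
             | some l => if l < x then l else x
             | none => x]) pre = pre ++ pmW c xs := by
  intro xs
  induction xs with
  | nil => intro pre c _; simp [pmW]
  | cons x xs ih =>
    intro pre c hlast
    rw [List.foldl_cons]
    simp only [hlast]
    rw [ih (pre ++ [if c < x then c else x]) (if c < x then c else x) (by simp)]
    simp [pmW, List.append_assoc]

lemma bPm_eq (x : Int) (xs : List Int) : bPm (x :: xs) = x :: pmW x xs := by
  unfold bPm
  rw [List.foldl_cons]
  simpa using bPm_fold xs [x] x (by simp)

lemma pmW_le (q c : Int) (h : c ≤ q) : ∀ xs, (pmW c xs).countP (fun v => decide (q < v)) = 0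
  | [] => rfl
  | x :: xs => by
    have hm : (if c < x then c else x) ≤ q := by split <;> omega
    have hnot : ¬ q < (if c < x then c else x) := by omega
    simp [pmW, List.countP_cons, hnot, pmW_le q _ hm xs]

lemma pmW_gt (q c : Int) (h : q < c) :
    ∀ xs, (pmW c xs).countP (fun v => decide (q < v)) = (xs.takeWhile (fun x => decide (q < x))).length
  | [] => rfl
  | x :: xs => by
    by_cases hx : q < x
    · have hm : q < (if c < x then c else x) := by split <;> omega
      simp [pmW, List.countP_cons, List.takeWhile_cons, hx, hm, pmW_gt q _ hm xs]
    · have hmle : (if c < x then c else x) ≤ q := by split <;> omega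
      have hnot : ¬ q < (if c < x then c else x) := by omega
      simp [pmW, List.countP_cons, List.takeWhile_cons, hx, hnot, pmW_le q _ hmle xs]

lemma countP_bPm (nums : List Int) (q : Int) :
    (bPm nums).countP (fun v => decide (q < v)) = fstIdx nums q := by
  cases nums with
  | nil => simp [bPm, fstIdx]
  | cons x xs =>
    rw [bPm_eq]
    by_cases hx : q < x
    · simp [List.countP_cons, fstIdx, List.takeWhile_cons, hx, pmW_gt q x hx xs]
    · simp [List.countP_cons, fstIdx, List.takeWhile_cons, hx, pmW_le q x (by omega) xs]

lemma dropWhile_cons_pred (p : Int → Bool) : ∀ (s : List Int) (y : Int) (ys : List Int),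
    s.dropWhile p = y :: ys → p y = false
  | [], y, ys, h => by simp at h
  | a :: s, y, ys, h => by
    by_cases ha : p a
    · rw [List.dropWhile_cons_of_pos ha] at h
      exact dropWhile_cons_pred p s y ys h
    · rw [List.dropWhile_cons_of_neg ha] at h
      cases h
      simpa using ha

lemma bInsOrd_perm (s : List Int) (x : Int) : (bInsOrd s x).Perm (x :: s) := by
  unfold bInsOrd
  simp only []
  rw [drop_len_takeWhile, List.append_assoc, List.singleton_append]
  have h := List.perm_middle (a := x)
    (l₁ := s.takeWhile (fun y => decide (y ≤ x))) (l₂ := s.dropWhile (fun y => decide (y ≤ x)))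
  simpa [List.takeWhile_append_dropWhile] using h

lemma bInsOrd_sorted (s : List Int) (x : Int) (hs : s.Pairwise (· ≤ ·)) :
    (bInsOrd s x).Pairwise (· ≤ ·) := by
  unfold bInsOrd
  simp only []
  rw [drop_len_takeWhile, List.append_assoc, List.singleton_append]
  have hsplit : (s.takeWhile (fun y => decide (y ≤ x)) ++ s.dropWhile (fun y => decide (y ≤ x))).Pairwise (· ≤ ·) := by
    rw [List.takeWhile_append_dropWhile]; exact hs
  rw [List.pairwise_append] at hsplit
  obtain ⟨ht, hd, hcross⟩ := hsplit
  rw [List.pairwise_append]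
  refine ⟨ht, ?_, ?_⟩
  · rw [List.pairwise_cons]
    refine ⟨?_, hd⟩
    intro b hb
    have hne : s.dropWhile (fun y => decide (y ≤ x)) ≠ [] := by
      intro hnil; rw [hnil] at hb; simp at hb
    obtain ⟨y, ys, hcons⟩ := List.exists_cons_of_ne_nil hne
    have hhead : ¬ (y ≤ x) := by
      have h0 := dropWhile_cons_pred (fun y => decide (y ≤ x)) s y ys hcons
      simpa using h0
    rw [hcons] at hb hd
    rcases List.mem_cons.mp hb with rfl | hb'
    · omega
    · have : y ≤ b := (List.pairwise_cons.mp hd).1 b hb'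
      omega
  · intro a ha b hb
    rcases List.mem_cons.mp hb with rfl | hb'
    · have := List.mem_takeWhile_imp ha
      simpa using this
    · exact hcross a ha b hb'

lemma bInsOrd_sortedL (xs : List Int) (x : Int) :
    bInsOrd (sortedL xs) x = sortedL (x :: xs) := by
  have hperm : (bInsOrd (sortedL xs) x).Perm (x :: xs) :=
    (bInsOrd_perm _ x).trans ((PySem.List.sorted_perm xs (fun y => y) false).cons x)
  have hpw : (bInsOrd (sortedL xs) x).Pairwise (· ≤ ·) :=
    bInsOrd_sorted _ x (PySem.List.sorted_pairwise xs (fun y => y))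
  exact (PySem.List.sorted_id_eq_of_perm_of_pairwise (x :: xs) _ hperm hpw).symm

lemma sortedL_nil : sortedL [] = [] := rfl

lemma bTables_fst (xs : List Int) : (bTables xs).1 = sortedL xs := by
  induction xs with
  | nil => simp [bTables, sortedL_nil]
  | cons x xs ih => simp [bTables, ih, bInsOrd_sortedL]

lemma bTables_snd (xs : List Int) : (bTables xs).2 = tSpec xs := by
  induction xs with
  | nil => simp [bTables, tSpec]
  | cons x xs ih =>
    have h := bInsOrd_sortedL xs x
    simp only [sortedL] at h
    simp [bTables, tSpec, ih, bTables_fst, h, sortedL]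

lemma tSpec_length (xs : List Int) : (tSpec xs).length = xs.length := by
  induction xs with
  | nil => rfl
  | cons x xs ih => simp [tSpec, ih]

lemma tSpec_getElem (xs : List Int) : ∀ (i : Nat) (h : i < xs.length),
    (tSpec xs)[i]'(by rw [tSpec_length]; exact h) = sortedL (bAccum 0 (sortedL (xs.drop i))) := by
  induction xs with
  | nil => intro i h; simp at h
  | cons x xs ih =>
    intro i h
    cases i with
    | zero => simp [tSpec]
    | succ i => simpa [tSpec] using ih i (by simpa using h)

lemma cntA_eq_countP (q : Int) : ∀ (s : List Int) (t : Int),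
    cntA q t s = ((bAccum t s).countP (fun v => decide (v ≤ q)) : Int) := by
  intro s
  induction s with
  | nil => intro t; simp [cntA, bAccum]
  | cons x xs ih =>
    intro t
    simp only [cntA, bAccum, List.countP_cons, ih (t + x)]
    by_cases h : t + x ≤ q <;> simp [h] <;> push_cast <;> ring

lemma fstIdx_le (nums : List Int) (q : Int) : fstIdx nums q ≤ nums.length :=
  (List.takeWhile_prefix _).length_le

lemma inner_fold (q : Int) (i : Nat) :
    ∀ (s : List Int) (t : Int) (res : List Int), i < res.length →
      (s.foldl (aStep q (i : Int)) (t, res)).2 = res.set i (res.getD i 0 + cntA q t s) := by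
  intro s
  induction s with
  | nil =>
    intro t res h
    simp only [List.foldl_nil, cntA, add_zero]
    rw [List.getD_eq_getElem _ _ h]
    exact (List.set_getElem_self h).symm
  | cons x xs ih =>
    intro t res h
    rw [List.foldl_cons]
    by_cases hc : t + x ≤ q
    · have hstep : aStep q (i : Int) (t, res) x
          = (t + x, res.set i (res.getD i 0 + 1)) := by
        simp [aStep, hc, PySem.List.pySetD_natCast, PySem.List.pyGetD_natCast]
      rw [hstep, ih (t + x) _ (by simpa using h)]
      have hmid : (res.set i (res.getD i 0 + 1)).getD i 0 = res.getD i 0 + 1 := by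
        rw [List.getD_eq_getElem _ _ (by simpa using h)]
        exact List.getElem_set_self (by simpa using h)
      rw [hmid, List.set_set]
      simp only [cntA, hc, if_pos]
      congr 1
      ring
    · have hstep : aStep q (i : Int) (t, res) x = (t + x, res) := by
        simp [aStep, hc]
      rw [hstep, ih (t + x) _ h]
      simp [cntA, hc]

lemma outer_fold (nums : List Int) :
    ∀ (qs : List Int) (pre : List Int),
      (PySem.List.enumerate qs (pre.length : Int)).foldl (aOuter nums)
        (pre ++ List.replicate qs.length 0)
      = pre ++ qs.map (fA nums) := by
  intro qs
  induction qs with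
  | nil => intro pre; simp [PySem.List.enumerate]
  | cons q qs ih =>
    intro pre
    rw [PySem.List.enumerate_cons, List.foldl_cons]
    simp only [List.length_cons, List.replicate_succ]
    have hlen : pre.length < (pre ++ 0 :: List.replicate qs.length 0).length := by simp
    have hres : aOuter nums (pre ++ 0 :: List.replicate qs.length (0 : Int)) ((pre.length : Int), q)
        = pre ++ fA nums q :: List.replicate qs.length 0 := by
      simp only [aOuter, fA]
      by_cases hf : aWhile nums q 0 = nums.length
      · simp [hf]
      · rw [if_neg hf, if_neg hf]
        rw [inner_fold q pre.length _ 0 _ hlen]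
        have hg : (pre ++ 0 :: List.replicate qs.length (0 : Int)).getD pre.length 0 = 0 := by
          rw [List.getD_eq_getElem _ _ hlen, List.getElem_append_right (le_refl _)]
          simp
        rw [hg, zero_add, List.set_append]
        simp [sortedL]
    rw [hres]
    have h2 := ih (pre ++ [fA nums q])
    have hcast : ((pre ++ [fA nums q]).length : Int) = (pre.length : Int) + 1 := by
      simp
    rw [hcast] at h2
    simpa [List.append_assoc] using h2

lemma A_eq_map (nums queries : List Int) :
    answerQueriesNaive nums queries = queries.map (fA nums) := by
  unfold answerQueriesNaive
  have h := outer_fold nums queries []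
  simpa using h

lemma fA_eq_fB (nums : List Int) (q : Int) :
    fA nums q =
      (let first := (bPm nums).foldl (fun c v => if q < v then c + 1 else c) (0 : Int)
       if first = (nums.length : Int) then 0
       else (PySem.List.pyGetD (bTables nums).2 first []).foldl
              (fun c s => if s ≤ q then c + 1 else c) (0 : Int)) := by
  have hw : aWhile nums q 0 = fstIdx nums q := by
    have h := aWhile_eq nums q 0 (Nat.zero_le _)
    simpa [fstIdx] using h
  have hcnt : (bPm nums).foldl (fun c v => if q < v then c + 1 else c) (0 : Int)
      = ((fstIdx nums q : Nat) : Int) := by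
    rw [PySem.List.foldl_ite_add_one (fun v => q < v), countP_bPm]
    simp
  simp only [hcnt]
  by_cases hF : fstIdx nums q = nums.length
  · simp [fA, hw, hF]
  · have hFlt : fstIdx nums q < nums.length := lt_of_le_of_ne (fstIdx_le nums q) hF
    have hne : ¬ ((fstIdx nums q : Nat) : Int) = (nums.length : Int) := by
      exact_mod_cast hF
    rw [if_neg hne]
    unfold fA
    rw [if_neg (by rw [hw]; exact hF), hw]
    rw [PySem.List.slice_from_natCast]
    rw [bTables_snd, PySem.List.pyGetD_natCast]
    rw [List.getD_eq_getElem _ _ (by rw [tSpec_length]; exact hFlt)]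
    rw [tSpec_getElem nums _ hFlt]
    rw [PySem.List.foldl_ite_add_one (fun s => s ≤ q), zero_add]
    have hperm : (sortedL (bAccum 0 (sortedL (nums.drop (fstIdx nums q))))).Perm
        (bAccum 0 (sortedL (nums.drop (fstIdx nums q)))) :=
      PySem.List.sorted_perm _ _ _
    rw [List.Perm.countP_eq _ hperm]
    rw [cntA_eq_countP]

-- ===== VERDICT (by name: the statement is the Claim_ definition above) =====
theorem answerQueriesNaive_spec : Claim_equal_answerQueriesNaive := by
  intro nums queries _
  unfold Spec_answerQueriesNaive answerQueriesNaive_alt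
  rw [A_eq_map]
  exact List.map_congr_left (fun q _ => fA_eq_fB nums q)
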